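-- pv_equiv track=rewrite | github.com/cenotelie/sapientia | sapientia/nlp/preprocessing/data_cleaning.py | sentences_fixing
-- ===== SOURCE A (Python) =====
-- def sentences_fixing(sentences):
--     """
--     Sentences fixing
--     :param sentences: sentences extracted from text
--     :return: correct sentences (when sentences are split, there might be errors that need fixing. For example,
--     e.g. might be considered as the end of a sentence, and it should not.)
--     """
--     fixed_sentences = []
--     eg = "e.g."
--     ref = "ref"
--     broken = False
--     for sentence in sentences:
--         if broken:
--             if fixed_sentences:
--                 new_sentence = fixed_sentences.pop() + " " + sentence
--             else:
--                 new_sentence = sentences[0]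
--             fixed_sentences.append(new_sentence)
--         else:
--             fixed_sentences.append(sentence)
--         if sentence.endswith(eg) or sentence.endswith(ref):
--             broken = True
--         else:
--             if broken:
--                 broken = False
--     return fixed_sentences
-- ===== SOURCE B (Python) =====
-- def sentences_fixing(sentences):
--     """Two-pass rewrite: first group consecutive sentences (a sentence joins the
--     current group iff the previous raw sentence ended with 'e.g.' or 'ref'),
--     then join each group with a space."""
--     groups = []
--     prev_broken = False
--     for sentence in sentences:
--         if prev_broken and groups:
--             groups[-1].append(sentence)
--         else:
--             groups.append([sentence])
--         prev_broken = sentence.endswith("e.g.") or sentence.endswith("ref")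
--     return [" ".join(group) for group in groups]
-- ===== Notes on version B (the rewrite author's own statement) =====
-- stated objective: alternative
-- what changed: Replaces A's running-flag accumulate-and-pop loop (which repeatedly pops the last merged string and re-concatenates) with a two-pass decomposition: one pass builds explicit groups of raw sentences keyed off the previous raw sentence's ending, a second pass joins each group with ' '.
import Mathlib
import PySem

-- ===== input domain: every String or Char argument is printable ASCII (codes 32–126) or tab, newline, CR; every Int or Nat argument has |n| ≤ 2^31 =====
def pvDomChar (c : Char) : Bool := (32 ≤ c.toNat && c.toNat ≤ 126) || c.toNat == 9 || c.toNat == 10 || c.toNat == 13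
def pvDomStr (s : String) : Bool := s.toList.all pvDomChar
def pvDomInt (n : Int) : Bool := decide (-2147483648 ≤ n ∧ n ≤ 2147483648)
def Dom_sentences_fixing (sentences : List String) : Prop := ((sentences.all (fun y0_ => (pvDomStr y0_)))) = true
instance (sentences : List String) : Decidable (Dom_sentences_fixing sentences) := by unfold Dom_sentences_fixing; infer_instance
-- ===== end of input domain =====

-- B replaces A's running-flag accumulate-and-pop loop with a two-pass decomposition
-- (group raw sentences, then join each group with " "): an alternative of the same cost.

-- ===== PORT A =====
-- A's loop body; the fixed_sentences list is kept in REVERSE order (Python appends to /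
-- pops from the end; here that is cons to / match on the front). `dead` is Python's
-- `sentences[0]` of the unreachable empty-pop branch.
def fixStep (dead : String) (st : List String × Bool) (sentence : String) : List String × Bool :=
  let fixedRev :=
    if st.2 then
      match st.1 with
      | last :: rest => (last ++ " " ++ sentence) :: rest   -- fixed_sentences.pop() + " " + sentence
      | [] => [dead]                                        -- new_sentence = sentences[0] (unreachable)
    else sentence :: st.1
  let broken :=
    if PySem.Str.endswith sentence "e.g." || PySem.Str.endswith sentence "ref" then true
    else if st.2 then false else st.2
  (fixedRev, broken)

def sentences_fixing (sentences : List String) : List String :=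
  -- `sentences[0]`: Python would raise on an empty list, but the branch is unreachable;
  -- headD "" stands in for the (never-used) value.
  ((sentences.foldl (fixStep (sentences.headD "")) ([], false)).1).reverse

-- ===== PORT B =====
-- B's grouping pass; groups are kept in reverse order, each group's members in reverse order.
def groupStep (st : List (List String) × Bool) (sentence : String) : List (List String) × Bool :=
  let groupsRev :=
    if st.2 then
      match st.1 with
      | g :: rest => (sentence :: g) :: rest   -- groups[-1].append(sentence)
      | [] => [[sentence]]                      -- `groups` falsy: groups.append([sentence])
    else [sentence] :: st.1
  (groupsRev, PySem.Str.endswith sentence "e.g." || PySem.Str.endswith sentence "ref")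

def sentences_fixing_alt (sentences : List String) : List String :=
  let groups := ((sentences.foldl groupStep ([], false)).1.reverse).map List.reverse
  groups.map (fun g => PySem.Str.join " " g)

-- ===== PRECONDITION & SPEC =====
def Spec_sentences_fixing (sentences : List String) (out : List String) : Prop := out = sentences_fixing_alt sentences
instance (sentences : List String) (out : List String) : Decidable (Spec_sentences_fixing sentences out) := by unfold Spec_sentences_fixing; infer_instance

-- ===== CLAIM (what is proved, stated in full; the proofs are below) =====
def Claim_equal_sentences_fixing : Prop := ∀ (sentences : List String), Dom_sentences_fixing sentences → Spec_sentences_fixing sentences (sentences_fixing sentences)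

-- ===== LEMMAS AND PROOFS =====

-- the value a (reversed) group contributes to the output
def joinGroup (g : List String) : String := PySem.Str.join " " g.reverse

lemma chars_join_append_singleton (sep q : List Char) (ps : List (List Char)) (h : ps ≠ []) :
    PySem.Chars.join sep (ps ++ [q]) = PySem.Chars.join sep ps ++ sep ++ q := by
  induction ps with
  | nil => exact absurd rfl h
  | cons p t ih =>
    cases t with
    | nil => simp [PySem.Chars.join_cons_cons, PySem.Chars.join_singleton]
    | cons b u =>
      simp only [List.cons_append] at ih ⊢
      rw [PySem.Chars.join_cons_cons, ih (by simp), PySem.Chars.join_cons_cons]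
      simp [List.append_assoc]

lemma join_append_singleton (l : List String) (s : String) (h : l ≠ []) :
    PySem.Str.join " " (l ++ [s]) = PySem.Str.join " " l ++ " " ++ s := by
  apply String.toList_inj.mp
  rw [String.toList_append, String.toList_append, PySem.Str.toList_join,
    PySem.Str.toList_join, List.map_append]
  exact chars_join_append_singleton _ _ _ (by simpa using h)

lemma joinGroup_cons (s : String) (g : List String) (h : g ≠ []) :
    joinGroup (s :: g) = joinGroup g ++ " " ++ s := by
  unfold joinGroup
  rw [List.reverse_cons, join_append_singleton _ _ (by simpa using h)]

lemma joinGroup_singleton (s : String) : joinGroup [s] = s := by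
  apply String.toList_inj.mp
  simp [joinGroup, PySem.Str.toList_join, PySem.Chars.join_singleton]

-- invariant carried by B's loop: when the flag is set, there is a head group and it is nonempty
def GInv (st : List (List String) × Bool) : Prop :=
  st.2 = true → ∃ g rest, st.1 = g :: rest ∧ g ≠ []

lemma loop_inv (l : List String) (dead : String) :
    ∀ (gs : List (List String)) (b : Bool), GInv (gs, b) →
      l.foldl (fixStep dead) (gs.map joinGroup, b) =
        ((l.foldl groupStep (gs, b)).1.map joinGroup, (l.foldl groupStep (gs, b)).2)
      ∧ GInv (l.foldl groupStep (gs, b)) := by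
  induction l with
  | nil => intro gs b h; exact ⟨rfl, h⟩
  | cons s t ih =>
    intro gs b h
    rw [List.foldl_cons, List.foldl_cons]
    by_cases hb : b = true
    · obtain ⟨g, rest, hgs, hg⟩ := h hb
      subst hgs hb
      have h1 : fixStep dead ((g :: rest).map joinGroup, true) s =
          ((groupStep ((g :: rest), true) s).1.map joinGroup,
            (groupStep ((g :: rest), true) s).2) := by
        simp [fixStep, groupStep, joinGroup_cons s g hg]
      rw [h1]
      exact ih _ _ (by intro _; exact ⟨s :: g, rest, rfl, by simp⟩)
    · have hb' : b = false := by simpa using hb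
      subst hb'
      have h1 : fixStep dead (gs.map joinGroup, false) s =
          ((groupStep (gs, false) s).1.map joinGroup, (groupStep (gs, false) s).2) := by
        simp [fixStep, groupStep, joinGroup_singleton]
      rw [h1]
      refine ih _ _ ?_
      intro _
      exact ⟨[s], gs, rfl, by simp⟩

-- ===== VERDICT (by name: the statement is the Claim_ definition above) =====
theorem sentences_fixing_spec : Claim_equal_sentences_fixing := by
  intro sentences _
  unfold Spec_sentences_fixing sentences_fixing sentences_fixing_alt
  have h := (loop_inv sentences (sentences.headD "") [] false (by intro h; cases h)).1
  simp only [List.map_nil] at h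
  rw [h]
  simp [joinGroup, Function.comp]
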